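-- pv_equiv track=rewrite | github.com/sai-charan-adurthi/advent-of-code-2020 | day-1/expense-report.py | print_triplet_product
-- ===== SOURCE A (Python) =====
-- def print_triplet_product(input_list):
--
--     for i in range(0, len(input_list)):
--
--         num_set = set()
--         diff_val = 2020 - input_list[i]
--
--         for j in range(i + 1, len(input_list)):
--             temp = diff_val - input_list[j]
--             if (temp) in num_set:
--                 return (input_list[i] * input_list[j] * temp)
--
--             num_set.add(input_list[j])
--
--     return None
-- ===== SOURCE B (Python) =====
-- def print_triplet_product(input_list):
--     n = len(input_list)
--     for i in range(n):
--         for j in range(i + 1, n):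
--             for k in range(i + 1, j):
--                 if input_list[i] + input_list[j] + input_list[k] == 2020:
--                     return input_list[i] * input_list[j] * input_list[k]
--     return None
-- ===== Notes on version B (the rewrite author's own statement) =====
-- stated objective: simpler
-- what changed: Replaced the per-i hash set and difference lookup by a plain brute-force triple loop (k scanning the elements between i and j), which visits triples in the same order and so returns the same first product.
import Mathlib
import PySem

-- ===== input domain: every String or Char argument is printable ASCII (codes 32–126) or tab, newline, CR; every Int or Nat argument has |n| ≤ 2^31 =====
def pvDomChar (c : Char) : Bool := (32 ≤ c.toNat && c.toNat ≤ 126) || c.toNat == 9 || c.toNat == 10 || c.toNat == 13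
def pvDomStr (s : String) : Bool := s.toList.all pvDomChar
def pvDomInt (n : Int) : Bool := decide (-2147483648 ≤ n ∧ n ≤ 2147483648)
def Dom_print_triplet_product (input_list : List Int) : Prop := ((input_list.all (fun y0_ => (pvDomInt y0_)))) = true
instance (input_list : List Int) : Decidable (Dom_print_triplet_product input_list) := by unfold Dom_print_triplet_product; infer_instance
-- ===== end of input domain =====

-- B replaces A's per-i hash set of seen values by a brute-force inner rescan (k over (i, j)),
-- visiting candidate pairs (i, j) in the same order, so the first product found is the same. Objective: simpler.

-- ===== PORT A =====
-- inner 'for j in range(i+1, len)' loop, carrying num_set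
def pvALoopJ (xs : List Int) (ai diff : Int) (j : Nat) (s : PySem.Set Int) : Option Int :=
  if j < xs.length then
    let aj := xs.getD j 0
    let temp := diff - aj
    if PySem.Set.contains s temp then some (ai * aj * temp)
    else pvALoopJ xs ai diff (j + 1) (PySem.Set.add s aj)
  else none
termination_by xs.length - j

-- outer 'for i in range(0, len)' loop
def pvALoopI (xs : List Int) (i : Nat) : Option Int :=
  if i < xs.length then
    let ai := xs.getD i 0
    match pvALoopJ xs ai (2020 - ai) (i + 1) PySem.Set.empty with
    | some v => some v
    | none => pvALoopI xs (i + 1)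
  else none
termination_by xs.length - i

def print_triplet_product (input_list : List Int) : Option Int := pvALoopI input_list 0

-- ===== PORT B =====
-- inner 'for k in range(i+1, j)' loop
def pvBLoopK (xs : List Int) (i j k : Nat) : Option Int :=
  if k < j then
    if xs.getD i 0 + xs.getD j 0 + xs.getD k 0 = 2020 then
      some (xs.getD i 0 * xs.getD j 0 * xs.getD k 0)
    else pvBLoopK xs i j (k + 1)
  else none
termination_by j - k

-- middle 'for j in range(i+1, n)' loop
def pvBLoopJ (xs : List Int) (i j : Nat) : Option Int :=
  if j < xs.length then
    match pvBLoopK xs i j (i + 1) with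
    | some v => some v
    | none => pvBLoopJ xs i (j + 1)
  else none
termination_by xs.length - j

-- outer 'for i in range(n)' loop
def pvBLoopI (xs : List Int) (i : Nat) : Option Int :=
  if i < xs.length then
    match pvBLoopJ xs i (i + 1) with
    | some v => some v
    | none => pvBLoopI xs (i + 1)
  else none
termination_by xs.length - i

def print_triplet_product_alt (input_list : List Int) : Option Int := pvBLoopI input_list 0

-- ===== PRECONDITION & SPEC =====
def Spec_print_triplet_product (input_list : List Int) (out : Option Int) : Prop := out = print_triplet_product_alt input_list
instance (input_list : List Int) (out : Option Int) : Decidable (Spec_print_triplet_product input_list out) := by unfold Spec_print_triplet_product; infer_instance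

-- ===== CLAIM (what is proved, stated in full; the proofs are below) =====
def Claim_equal_print_triplet_product : Prop := ∀ (input_list : List Int), Dom_print_triplet_product input_list → Spec_print_triplet_product input_list (print_triplet_product input_list)

-- ===== LEMMAS AND PROOFS =====

-- If some element in positions [k, j) equals temp = 2020 - xs[i] - xs[j], B's inner scan returns xs[i]*xs[j]*temp.
theorem pvBLoopK_some (xs : List Int) (i j : Nat) :
    ∀ n k, j - k ≤ n → (∃ m, k ≤ m ∧ m < j ∧ xs.getD m 0 = 2020 - xs.getD i 0 - xs.getD j 0) →
      pvBLoopK xs i j k = some (xs.getD i 0 * xs.getD j 0 * (2020 - xs.getD i 0 - xs.getD j 0)) := by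
  intro n
  induction n with
  | zero => rintro k hn ⟨m, hkm, hmj, hm⟩; omega
  | succ n ih =>
    rintro k hn ⟨m, hkm, hmj, hm⟩
    rw [pvBLoopK]
    have hkj : k < j := Nat.lt_of_le_of_lt hkm hmj
    simp only [if_pos hkj]
    by_cases heq : xs.getD i 0 + xs.getD j 0 + xs.getD k 0 = 2020
    · have hk : xs.getD k 0 = 2020 - xs.getD i 0 - xs.getD j 0 := by omega
      rw [if_pos heq, hk]
    · have hkm' : k ≠ m := by rintro rfl; omega
      simp only [if_neg heq]
      exact ih (k + 1) (by omega) ⟨m, by omega, hmj, hm⟩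

-- If no element in positions [k, j) equals temp, B's inner scan returns none.
theorem pvBLoopK_none (xs : List Int) (i j : Nat) :
    ∀ n k, j - k ≤ n → (¬ ∃ m, k ≤ m ∧ m < j ∧ xs.getD m 0 = 2020 - xs.getD i 0 - xs.getD j 0) →
      pvBLoopK xs i j k = none := by
  intro n
  induction n with
  | zero => intro k hn _; rw [pvBLoopK]; simp only [if_neg (by omega : ¬ k < j)]
  | succ n ih =>
    intro k hn hno
    rw [pvBLoopK]
    by_cases hkj : k < j
    · simp only [if_pos hkj]
      have hne : ¬ xs.getD i 0 + xs.getD j 0 + xs.getD k 0 = 2020 := by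
        intro h
        exact hno ⟨k, le_refl k, hkj, by omega⟩
      simp only [if_neg hne]
      exact ih (k + 1) (by omega)
        (fun ⟨m, h1, h2, h3⟩ => hno ⟨m, by omega, h2, h3⟩)
    · simp [hkj]

-- A's inner loop with a set whose membership matches positions [i+1, j) equals B's middle loop.
theorem pvLoopJ_eq (xs : List Int) (i : Nat) :
    ∀ n j s, xs.length - j ≤ n → i + 1 ≤ j →
      (∀ x : Int, x ∈ s ↔ ∃ m, i + 1 ≤ m ∧ m < j ∧ xs.getD m 0 = x) →
      pvALoopJ xs (xs.getD i 0) (2020 - xs.getD i 0) j s = pvBLoopJ xs i j := by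
  intro n
  induction n with
  | zero =>
    intro j s hn _ _
    rw [pvALoopJ, pvBLoopJ]
    simp only [if_neg (by omega : ¬ j < xs.length)]
  | succ n ih =>
    intro j s hn hij hinv
    rw [pvALoopJ, pvBLoopJ]
    by_cases hj : j < xs.length
    · simp only [if_pos hj]
      set temp := 2020 - xs.getD i 0 - xs.getD j 0 with htemp
      by_cases hmem : temp ∈ s
      · have hcon : PySem.Set.contains s temp = true := (PySem.Set.contains_iff s temp).mpr hmem
        obtain ⟨m, h1, h2, h3⟩ := (hinv temp).1 hmem
        rw [pvBLoopK_some xs i j (j - (i+1)) (i + 1) (le_refl _) ⟨m, h1, h2, h3⟩]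
        rw [if_pos hcon]
      · have hcon : ¬ PySem.Set.contains s temp = true :=
          fun h => hmem ((PySem.Set.contains_iff s temp).mp h)
        rw [pvBLoopK_none xs i j (j - (i+1)) (i + 1) (le_refl _)
          (fun ⟨m, h1, h2, h3⟩ => hmem ((hinv temp).2 ⟨m, h1, h2, h3⟩))]
        rw [if_neg hcon]
        exact ih (j + 1) _ (by omega) (by omega) (by
          intro x
          rw [PySem.Set.mem_add, hinv x]
          constructor
          · rintro (⟨m, h1, h2, h3⟩ | rfl)
            · exact ⟨m, h1, by omega, h3⟩
            · exact ⟨j, hij, Nat.lt_succ_self j, rfl⟩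
          · rintro ⟨m, h1, h2, h3⟩
            by_cases hmj : m = j
            · right; rw [← h3, hmj]
            · left; exact ⟨m, h1, by omega, h3⟩)
    · simp [hj]

-- Outer loops agree.
theorem pvLoopI_eq (xs : List Int) : ∀ n i, xs.length - i ≤ n → pvALoopI xs i = pvBLoopI xs i := by
  intro n
  induction n with
  | zero =>
    intro i hn
    rw [pvALoopI, pvBLoopI]
    simp only [if_neg (by omega : ¬ i < xs.length)]
  | succ n ih =>
    intro i hn
    rw [pvALoopI, pvBLoopI]
    by_cases hi : i < xs.length
    · simp only [if_pos hi]
      rw [pvLoopJ_eq xs i (xs.length - (i + 1)) (i + 1) PySem.Set.empty (le_refl _) (le_refl _) (by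
        intro x
        constructor
        · intro h; cases h
        · rintro ⟨m, h1, h2, _⟩; omega)]
      cases pvBLoopJ xs i (i + 1) with
      | some v => rfl
      | none => exact ih (i + 1) (by omega)
    · simp [hi]

-- ===== VERDICT (by name: the statement is the Claim_ definition above) =====
theorem print_triplet_product_spec : Claim_equal_print_triplet_product := by
  intro xs _
  show print_triplet_product xs = print_triplet_product_alt xs
  exact pvLoopI_eq xs xs.length 0 (by omega)
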